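-- pv_equiv track=rewrite | github.com/researchart/fse18 | submissions/denial-of-service/visualization/loc-vs-unique.py | get_loc_per_repository
-- ===== SOURCE A (Python) =====
-- def get_loc_per_repository(repo):
--     """
--     Get LOC in the repository.
--
--     Keyword arguments:
--     repo -- object containing properties of the repo
--     """
--     loc_count = 0
--
--     for file in repo['files']:
--         if file is None or not 'LoC' in file:
--             return -1
--         loc = file['LoC']
--
--         if loc <= 0:
--             return -1
--
--         loc_count += loc
--
--     return loc_count
-- ===== SOURCE B (Python) =====
-- def get_loc_per_repository(repo):
--     """Two-pass re-implementation: validate all files, then sum."""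
--     files = list(repo['files'])
--     if any(f is None or 'LoC' not in f or f['LoC'] <= 0 for f in files):
--         return -1
--     return sum(f['LoC'] for f in files)
-- ===== Notes on version B (the rewrite author's own statement) =====
-- stated objective: simpler
-- what changed: Replaces the single interleaved accumulate-with-early-return loop by a separate validation pass (any over the materialized file list) followed by a plain sum over the valid files.
import Mathlib
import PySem

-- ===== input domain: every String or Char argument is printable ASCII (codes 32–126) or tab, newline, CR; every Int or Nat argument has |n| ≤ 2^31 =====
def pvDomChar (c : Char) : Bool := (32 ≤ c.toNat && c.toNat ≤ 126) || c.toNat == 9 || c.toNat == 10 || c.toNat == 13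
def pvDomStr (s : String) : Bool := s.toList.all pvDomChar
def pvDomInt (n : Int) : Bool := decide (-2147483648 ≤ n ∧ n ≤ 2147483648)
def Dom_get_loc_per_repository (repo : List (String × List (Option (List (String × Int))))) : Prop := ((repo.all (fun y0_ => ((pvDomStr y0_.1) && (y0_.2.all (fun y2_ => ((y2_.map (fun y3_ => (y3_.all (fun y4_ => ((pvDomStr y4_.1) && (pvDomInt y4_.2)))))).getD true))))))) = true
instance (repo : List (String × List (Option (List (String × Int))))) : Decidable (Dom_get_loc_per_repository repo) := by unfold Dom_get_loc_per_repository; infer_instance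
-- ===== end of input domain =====

-- B is a simpler decomposition of A: a validation pass followed by a plain summation,
-- instead of A's single loop that interleaves validation with accumulation.

-- ===== PORT A =====
-- A's loop: early return -1 on an invalid file, otherwise accumulate loc_count.
def pvGoA : List (Option (List (String × Int))) → Int → Int
  | [], locCount => locCount
  | f :: rest, locCount =>
    match f with
    | none => -1
    | some d =>
      if (PySem.Dict.mk d).contains "LoC" = false then -1
      else
        let loc := (PySem.Dict.mk d).getD "LoC" 0
        if loc ≤ 0 then -1
        else pvGoA rest (locCount + loc)

def get_loc_per_repository (repo : List (String × List (Option (List (String × Int))))) : Int :=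
  match (PySem.Dict.mk repo).get? "files" with
  | none => 0  -- Python raises KeyError here; excluded by Pre_
  | some files => pvGoA files 0

-- ===== PORT B =====
-- B's validity test: f is None or 'LoC' not in f or f['LoC'] <= 0
def pvInvalid (f : Option (List (String × Int))) : Bool :=
  match f with
  | none => true
  | some d =>
    if (PySem.Dict.mk d).contains "LoC" = false then true
    else decide ((PySem.Dict.mk d).getD "LoC" 0 ≤ 0)

def get_loc_per_repository_alt (repo : List (String × List (Option (List (String × Int))))) : Int :=
  match (PySem.Dict.mk repo).get? "files" with
  | none => 0  -- Python raises KeyError here; excluded by Pre_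
  | some files =>
    if files.any pvInvalid then -1
    else (files.map (fun f => (PySem.Dict.mk (f.getD [])).getD "LoC" 0)).sum

-- ===== PRECONDITION & SPEC =====
-- Pre_ excludes exactly the inputs where repo['files'] raises KeyError (no "files" key).
def Pre_get_loc_per_repository (repo : List (String × List (Option (List (String × Int))))) : Prop :=
  (PySem.Dict.mk repo).contains "files" = true
instance (repo : List (String × List (Option (List (String × Int))))) : Decidable (Pre_get_loc_per_repository repo) := by unfold Pre_get_loc_per_repository; infer_instance

def pvWitness_get_loc_per_repository : (List (String × List (Option (List (String × Int))))) :=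
  [("files", [some [("LoC", 3)], some [("LoC", 5)]])]

def Spec_get_loc_per_repository (repo : List (String × List (Option (List (String × Int))))) (out : Int) : Prop := out = get_loc_per_repository_alt repo
instance (repo : List (String × List (Option (List (String × Int))))) (out : Int) : Decidable (Spec_get_loc_per_repository repo out) := by unfold Spec_get_loc_per_repository; infer_instance

-- ===== CLAIM (what is proved, stated in full; the proofs are below) =====
def Claim_equal_get_loc_per_repository : Prop := ∀ (repo : List (String × List (Option (List (String × Int))))), Dom_get_loc_per_repository repo → Pre_get_loc_per_repository repo → Spec_get_loc_per_repository repo (get_loc_per_repository repo)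

-- ===== LEMMAS AND PROOFS =====

-- A's interleaved loop equals B's validate-then-sum decomposition, for any accumulator.
theorem pvGoA_eq (files : List (Option (List (String × Int)))) :
    ∀ locCount : Int, pvGoA files locCount =
      if files.any pvInvalid then -1
      else locCount + (files.map (fun f => (PySem.Dict.mk (f.getD [])).getD "LoC" 0)).sum := by
  induction files with
  | nil => intro locCount; simp [pvGoA]
  | cons f rest ih =>
    intro locCount
    cases f with
    | none => simp [pvGoA, pvInvalid]
    | some d =>
      cases hc : (PySem.Dict.mk d).contains "LoC" with
      | false => simp [pvGoA, pvInvalid, hc]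
      | true =>
        by_cases hl : (PySem.Dict.mk d).getD "LoC" 0 ≤ 0
        · simp [pvGoA, pvInvalid, hc, hl]
        · simp only [pvGoA, pvInvalid, hc, hl, List.any_cons, List.map_cons, List.sum_cons,
            Option.getD_some, Bool.true_eq_false, if_false, ih]
          by_cases hr : rest.any pvInvalid = true
          · simp [hr]
          · simp [hr]; ring

-- ===== VERDICT (by name: the statement is the Claim_ definition above) =====
theorem get_loc_per_repository_spec : Claim_equal_get_loc_per_repository := by
  intro repo _ hpre
  unfold Pre_get_loc_per_repository at hpre
  unfold Spec_get_loc_per_repository get_loc_per_repository get_loc_per_repository_alt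
  cases hf : (PySem.Dict.mk repo).get? "files" with
  | none =>
    exfalso
    rw [PySem.Dict.contains_eq_isSome_get?, hf] at hpre
    simp at hpre
  | some files =>
    simp only [pvGoA_eq]
    split_ifs with h
    · rfl
    · simp
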